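-- pv_equiv track=rewrite | github.com/dsgelab/FinnGAN | plot.py | smart_label
-- ===== SOURCE A (Python) =====
-- def get_true_count(args):
--     true_count = 0
--
--     for k, v in args.items():
--         if k != 'n_endpoints':
--             if v:
--                 true_count += 1
--
--     return true_count
--
-- def smart_label(args):
--     true_count = get_true_count(args)
--     false_count = len(args) - 1 - true_count
--
--     name_map = {
--         'use_aux_info': 'AUX',
--         'use_mbd': 'MBD',
--         'use_gp': '0-GP',
--         'feature_matching': 'FM',
--         'only_pretraining': 'MLE',
--     }
--
--     if true_count == 1:
--         for k, v in args.items():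
--             if k != 'n_endpoints' and v:
--                 return name_map[k]
--     elif true_count == 0:
--         return 'BASE'
--
--     strs = []
--
--     for k, v in args.items():
--         if k != 'n_endpoints' and v:
--             strs.append(k + '=True')
--
--     return ','.join(strs)
-- ===== SOURCE B (Python) =====
-- def smart_label(args):
--     name_map = {
--         'use_aux_info': 'AUX',
--         'use_mbd': 'MBD',
--         'use_gp': '0-GP',
--         'feature_matching': 'FM',
--         'only_pretraining': 'MLE',
--     }
--
--     # Streaming state machine: 'pending' holds a lone true key whose fate is
--     # still undecided; once a second true key arrives we switch to building
--     # the comma-join parts directly.  No counting pass, no rescans.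
--     pending = None
--     parts = None
--     for k, v in args.items():
--         if k == 'n_endpoints' or not v:
--             continue
--         if parts is not None:
--             parts.append(k + '=True')
--         elif pending is None:
--             pending = k
--         else:
--             parts = [pending + '=True', k + '=True']
--             pending = None
--
--     if parts is not None:
--         return ','.join(parts)
--     if pending is None:
--         return 'BASE'
--     return name_map[pending]
-- ===== Notes on version B (the rewrite author's own statement) =====
-- stated objective: alternative
-- what changed: Replaces the count-then-rescan structure (a counting helper, the unused false_count, and two further full scans) with a single-pass state machine: a 'pending' lone true key that is promoted into a comma-join parts list the moment a second true key arrives, so no count and no intermediate key list are ever built.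
import Mathlib
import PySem

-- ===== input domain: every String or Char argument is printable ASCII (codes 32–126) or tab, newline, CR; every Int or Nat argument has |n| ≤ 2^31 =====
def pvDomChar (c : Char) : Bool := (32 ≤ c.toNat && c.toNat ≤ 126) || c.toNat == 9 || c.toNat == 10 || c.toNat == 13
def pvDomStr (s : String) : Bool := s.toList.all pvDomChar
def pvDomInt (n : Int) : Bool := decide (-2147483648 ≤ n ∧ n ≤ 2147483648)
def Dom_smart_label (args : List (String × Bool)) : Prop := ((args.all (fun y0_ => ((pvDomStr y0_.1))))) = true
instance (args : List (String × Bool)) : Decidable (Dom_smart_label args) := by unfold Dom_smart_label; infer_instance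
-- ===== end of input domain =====

-- B replaces A's count-then-rescan structure by a single-pass state machine
-- (a pending lone true key, promoted to a comma-join parts list on the second
-- true key): an alternative decomposition of the same cost.

-- ===== PORT A =====
def get_true_count (args : List (String × Bool)) : Int :=
  args.foldl (fun true_count kv =>
    if kv.1 ≠ "n_endpoints" then (if kv.2 then true_count + 1 else true_count) else true_count) 0

def pvNameMap : PySem.Dict String String :=
  PySem.Dict.ofList
    [("use_aux_info", "AUX"), ("use_mbd", "MBD"), ("use_gp", "0-GP"),
     ("feature_matching", "FM"), ("only_pretraining", "MLE")]

-- the 'for k, v in args.items(): … return name_map[k]' loop of the true_count == 1 branch;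
-- a KeyError (lookup = none) is excluded by Pre_
def pvFindLabel : List (String × Bool) → Option String
  | [] => none
  | kv :: rest =>
      if kv.1 ≠ "n_endpoints" ∧ kv.2 then PySem.Dict.get? pvNameMap kv.1 else pvFindLabel rest

def smart_label (args : List (String × Bool)) : String :=
  let true_count := get_true_count args
  if true_count = 1 then
    (pvFindLabel args).getD ""
  else if true_count = 0 then
    "BASE"
  else
    PySem.Str.join ","
      (args.foldl (fun strs kv =>
        if kv.1 ≠ "n_endpoints" ∧ kv.2 then strs ++ [kv.1 ++ "=True"] else strs) [])

-- ===== PORT B =====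
-- state = (pending, parts), exactly Source B's two loop variables
def pvStep (st : Option String × Option (List String)) (kv : String × Bool) :
    Option String × Option (List String) :=
  if kv.1 == "n_endpoints" || !kv.2 then st
  else
    match st with
    | (pending, some parts) => (pending, some (parts ++ [kv.1 ++ "=True"]))
    | (none, none) => (some kv.1, none)
    | (some p, none) => (none, some [p ++ "=True", kv.1 ++ "=True"])

def smart_label_alt (args : List (String × Bool)) : String :=
  match args.foldl pvStep (none, none) with
  | (_, some parts) => PySem.Str.join "," parts
  | (none, none) => "BASE"
  | (some p, none) => (PySem.Dict.get? pvNameMap p).getD ""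

-- ===== PRECONDITION & SPEC =====
-- Pre_ excludes lists with duplicate keys (a Python dict cannot hold them, so A's dict
-- iteration has no list counterpart there) and inputs whose single true key (other than
-- 'n_endpoints') is absent from name_map, where A raises KeyError (and B raises it too).
def Pre_smart_label (args : List (String × Bool)) : Prop :=
  (args.map Prod.fst).Nodup ∧
  ((args.filter (fun kv => kv.1 != "n_endpoints" && kv.2)).length = 1 →
    ∀ kv ∈ args.filter (fun kv => kv.1 != "n_endpoints" && kv.2),
      kv.1 ∈ ["use_aux_info", "use_mbd", "use_gp", "feature_matching", "only_pretraining"])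
instance (args : List (String × Bool)) : Decidable (Pre_smart_label args) := by
  unfold Pre_smart_label; infer_instance

def pvWitness_smart_label : (List (String × Bool)) :=
  [("use_mbd", true), ("use_gp", false), ("n_endpoints", true)]

def Spec_smart_label (args : List (String × Bool)) (out : String) : Prop := out = smart_label_alt args
instance (args : List (String × Bool)) (out : String) : Decidable (Spec_smart_label args out) := by unfold Spec_smart_label; infer_instance

-- ===== CLAIM (what is proved, stated in full; the proofs are below) =====
def Claim_equal_smart_label : Prop := ∀ (args : List (String × Bool)), Dom_smart_label args → Pre_smart_label args → Spec_smart_label args (smart_label args)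

-- ===== LEMMAS AND PROOFS =====

-- the true (non-'n_endpoints') keys, in order
def pvKeys (args : List (String × Bool)) : List String :=
  (args.filter (fun kv => kv.1 != "n_endpoints" && kv.2)).map Prod.fst

theorem pv_count_go (args : List (String × Bool)) : ∀ acc : Int,
    args.foldl (fun true_count kv =>
      if kv.1 ≠ "n_endpoints" then (if kv.2 then true_count + 1 else true_count) else true_count) acc
      = acc + ((pvKeys args).length : Int) := by
  induction args with
  | nil => intro acc; simp [pvKeys]
  | cons kv rest ih =>
      intro acc
      rw [List.foldl_cons, ih]
      simp only [pvKeys, List.filter_cons]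
      by_cases h1 : kv.1 = "n_endpoints"
      · simp [h1, pvKeys]
      · cases hv : kv.2 <;> simp [h1, hv, pvKeys] <;> omega

theorem pv_count (args : List (String × Bool)) :
    get_true_count args = ((pvKeys args).length : Int) := by
  rw [get_true_count, pv_count_go args 0]; ring

theorem pv_find (args : List (String × Bool)) :
    pvFindLabel args
      = ((pvKeys args).head?).bind (fun k => PySem.Dict.get? pvNameMap k) := by
  induction args with
  | nil => simp [pvFindLabel, pvKeys]
  | cons kv rest ih =>
      simp only [pvFindLabel, pvKeys, List.filter_cons]
      by_cases h1 : kv.1 = "n_endpoints"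
      · simp [h1, ih, pvKeys]
      · cases hv : kv.2 <;> simp [h1, ih, pvKeys]

theorem pv_strs (args : List (String × Bool)) : ∀ acc : List String,
    args.foldl (fun strs kv =>
      if kv.1 ≠ "n_endpoints" ∧ kv.2 then strs ++ [kv.1 ++ "=True"] else strs) acc
      = acc ++ (pvKeys args).map (fun k => k ++ "=True") := by
  induction args with
  | nil => intro acc; simp [pvKeys]
  | cons kv rest ih =>
      intro acc
      rw [List.foldl_cons, ih]
      simp only [pvKeys, List.filter_cons]
      by_cases h1 : kv.1 = "n_endpoints"
      · simp [h1, pvKeys]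
      · cases hv : kv.2 <;> simp [h1, pvKeys]

-- B's fold from a 'parts already started' state just appends the remaining keys
theorem pv_stateParts (args : List (String × Bool)) : ∀ (pending : Option String) (parts : List String),
    args.foldl pvStep (pending, some parts)
      = (pending, some (parts ++ (pvKeys args).map (fun k => k ++ "=True"))) := by
  induction args with
  | nil => intro pending parts; simp [pvKeys]
  | cons kv rest ih =>
      intro pending parts
      rw [List.foldl_cons]
      simp only [pvStep, pvKeys, List.filter_cons]
      by_cases h1 : kv.1 = "n_endpoints"
      · simp [h1, ih, pvKeys]
      · cases hv : kv.2 <;> simp [h1, hv, ih, pvKeys]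

-- B's fold from a pending-key state
theorem pv_statePending (args : List (String × Bool)) : ∀ p : String,
    args.foldl pvStep (some p, none)
      = (if (pvKeys args) = [] then (some p, none)
         else (none, some ((p :: pvKeys args).map (fun k => k ++ "=True")))) := by
  induction args with
  | nil => intro p; simp [pvKeys]
  | cons kv rest ih =>
      intro p
      rw [List.foldl_cons]
      by_cases hc : (kv.1 != "n_endpoints" && kv.2) = true
      · have hkeys : pvKeys (kv :: rest) = kv.1 :: pvKeys rest := by
          simp [pvKeys, List.filter_cons, hc]
        simp only [Bool.and_eq_true, bne_iff_ne] at hc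
        simp [pvStep, hc.1, hc.2, pv_stateParts, hkeys]
      · have hkeys : pvKeys (kv :: rest) = pvKeys rest := by
          simp [pvKeys, List.filter_cons, hc]
        have hstep : pvStep (some p, none) kv = (some p, none) := by
          simp only [pvStep]
          rw [if_pos (by revert hc; cases h1 : (kv.1 == "n_endpoints") <;> cases hv : kv.2 <;> simp_all)]
        rw [hstep, hkeys, ih]

-- B's fold from the initial state, characterised by the true-key list
theorem pv_stateInit (args : List (String × Bool)) :
    args.foldl pvStep (none, none)
      = (match pvKeys args with
         | [] => (none, none)
         | [k] => (some k, none)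
         | k :: ks => (none, some ((k :: ks).map (fun k => k ++ "=True")))) := by
  induction args with
  | nil => simp [pvKeys]
  | cons kv rest ih =>
      rw [List.foldl_cons]
      by_cases hc : (kv.1 != "n_endpoints" && kv.2) = true
      · have hkeys : pvKeys (kv :: rest) = kv.1 :: pvKeys rest := by
          simp [pvKeys, List.filter_cons, hc]
        simp only [Bool.and_eq_true, bne_iff_ne] at hc
        have hstep : pvStep (none, none) kv = (some kv.1, none) := by
          simp [pvStep, hc.1, hc.2]
        rw [hstep, pv_statePending, hkeys]
        cases hk : pvKeys rest with
        | nil => simp [hk]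
        | cons k ks => simp [hk]
      · have hkeys : pvKeys (kv :: rest) = pvKeys rest := by
          simp [pvKeys, List.filter_cons, hc]
        have hstep : pvStep (none, none) kv = (none, none) := by
          simp only [pvStep]
          rw [if_pos (by revert hc; cases h1 : (kv.1 == "n_endpoints") <;> cases hv : kv.2 <;> simp_all)]
        rw [hstep, hkeys, ih]

-- ===== VERDICT (by name: the statement is the Claim_ definition above) =====
theorem smart_label_spec : Claim_equal_smart_label := by
  intro args _ _
  unfold Spec_smart_label smart_label smart_label_alt
  rw [pv_count, pv_find, pv_strs, pv_stateInit]
  cases hf : pvKeys args with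
  | nil => simp
  | cons k rest =>
      cases rest with
      | nil => simp
      | cons k2 rest2 =>
          simp only [List.map_cons, List.length_cons]
          rw [if_neg (by omega), if_neg (by omega)]
          simp
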